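-- pv_equiv track=rewrite | github.com/MonikaChris/advent-code | dec-2023/Day14/day14_part2.py | hash_rows
-- ===== SOURCE A (Python) =====
-- def hash_rows(grid, col_start, col_end, col_step):
--   ROWS = len(grid)
--   COLS = len(grid[0])
--
--   rows = {} # c : [(O count, # row index)...]
--
--   for r in range(ROWS):
--     rows[r] = []
--     o_count = 0
--     for c in range(col_start, col_end, col_step):
--       if grid[r][c] == "O":
--         o_count += 1
--       if grid[r][c] == "#":
--         rows[r].append((o_count, c))
--         o_count = 0
--     if o_count > 0:
--       rows[r].append((o_count, -1))
--   return rows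
-- ===== SOURCE B (Python) =====
-- def hash_rows(grid, col_start, col_end, col_step):
--   cols = list(range(col_start, col_end, col_step))
--   result = {}
--   for r, row in enumerate(grid):
--     cells = [(c, row[c]) for c in cols]
--     bounds = [i for i, (_, ch) in enumerate(cells) if ch == "#"]
--     prev = 0
--     segs = []
--     for i in bounds:
--       cnt = sum(1 for _, ch in cells[prev:i] if ch == "O")
--       segs.append((cnt, cells[i][0]))
--       prev = i + 1
--     tail = sum(1 for _, ch in cells[prev:] if ch == "O")
--     if tail > 0:
--       segs.append((tail, -1))
--     result[r] = segs
--   return result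
-- ===== Notes on version B (the rewrite author's own statement) =====
-- stated objective: alternative
-- what changed: Replaces A's interleaved counter-and-reset accumulator scan by an index-first decomposition: per row it materialises the stepped (column,char) cells, collects the indices of '#' cells as segment boundaries, then counts 'O's in each inter-boundary slice (and the tail) in a second pass.
import Mathlib
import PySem

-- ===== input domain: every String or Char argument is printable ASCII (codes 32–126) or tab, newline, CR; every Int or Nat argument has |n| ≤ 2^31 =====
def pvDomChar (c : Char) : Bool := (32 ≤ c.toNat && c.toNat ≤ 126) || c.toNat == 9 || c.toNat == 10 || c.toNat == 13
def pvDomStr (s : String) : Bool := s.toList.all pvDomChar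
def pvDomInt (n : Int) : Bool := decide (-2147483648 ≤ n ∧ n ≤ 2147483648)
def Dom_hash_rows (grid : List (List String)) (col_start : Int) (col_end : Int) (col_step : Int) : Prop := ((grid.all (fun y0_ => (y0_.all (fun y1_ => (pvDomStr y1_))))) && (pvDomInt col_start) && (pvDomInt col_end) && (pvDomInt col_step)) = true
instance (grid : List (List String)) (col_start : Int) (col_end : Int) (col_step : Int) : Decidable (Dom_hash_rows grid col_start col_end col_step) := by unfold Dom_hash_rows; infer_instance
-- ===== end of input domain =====

-- B replaces A's interleaved counter-and-reset scan by an index-first decomposition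
-- (collect '#' boundary indices per row, then count 'O's in each inter-boundary slice);
-- same asymptotic cost, alternative structure.


-- ===== PORT A =====
def hash_rows (grid : List (List String)) (col_start : Int) (col_end : Int) (col_step : Int) : List (Int × List (Int × Int)) :=
  let ROWS : Int := (grid.length : Int)
  let _COLS : Int := ((PySem.List.pyGetD grid 0 []).length : Int)  -- len(grid[0]); raises on empty grid, excluded by Pre_
  (PySem.List.pyRange 0 ROWS 1).foldl (fun rows r =>
    let row := PySem.List.pyGetD grid r []
    let st := (PySem.List.pyRange col_start col_end col_step).foldl
      (fun (st : Int × List (Int × Int)) c =>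
        let cell := PySem.List.pyGetD row c ""
        let o := if cell == "O" then st.1 + 1 else st.1
        if cell == "#" then (0, st.2 ++ [(o, c)]) else (o, st.2))
      (0, [])
    rows ++ [(r, if st.1 > 0 then st.2 ++ [(st.1, -1)] else st.2)]) []

-- ===== PORT B =====
def hash_rows_alt (grid : List (List String)) (col_start : Int) (col_end : Int) (col_step : Int) : List (Int × List (Int × Int)) :=
  let cols := PySem.List.pyRange col_start col_end col_step
  (PySem.List.enumerate grid 0).foldl (fun result p =>
    let cells := cols.map (fun c => (c, PySem.List.pyGetD p.2 c ""))
    let bounds := ((PySem.List.enumerate cells 0).filter (fun q => q.2.2 == "#")).map (fun q => q.1)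
    let st := bounds.foldl
      (fun (st : Int × List (Int × Int)) i =>
        let cnt : Int := ((PySem.List.slice cells (some st.1) (some i)).countP (fun q => q.2 == "O") : Int)
        (i + 1, st.2 ++ [(cnt, (PySem.List.pyGetD cells i (0, "")).1)]))
      (0, [])
    let tail : Int := ((PySem.List.slice cells (some st.1) none).countP (fun q => q.2 == "O") : Int)
    result ++ [(p.1, if tail > 0 then st.2 ++ [(tail, -1)] else st.2)]) []

-- ===== PRECONDITION & SPEC =====
-- Pre_: exactly where Python A returns normally: a nonempty grid (len(grid[0])),
-- a nonzero step (range), and every stepped column a valid Python index into every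
-- row — stated in closed form via the first and last elements of the range
-- (the range is monotone, so all its elements lie between them).
def Pre_hash_rows (grid : List (List String)) (col_start : Int) (col_end : Int) (col_step : Int) : Prop :=
  grid ≠ [] ∧ col_step ≠ 0 ∧
    (let n := max 0 (-(PySem.Int.floordiv (col_start - col_end) col_step));
     n = 0 ∨ ∀ row ∈ grid,
       let last := col_start + (n - 1) * col_step;
       -(row.length : Int) ≤ min col_start last ∧ max col_start last < (row.length : Int))
instance (grid : List (List String)) (col_start : Int) (col_end : Int) (col_step : Int) : Decidable (Pre_hash_rows grid col_start col_end col_step) := by unfold Pre_hash_rows; infer_instance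
def pvWitness_hash_rows : List (List String) × Int × Int × Int := ([["O", "#", "O"], [".", ".", "#"]], 0, 3, 1)

def Spec_hash_rows (grid : List (List String)) (col_start : Int) (col_end : Int) (col_step : Int) (out : List (Int × List (Int × Int))) : Prop := out = hash_rows_alt grid col_start col_end col_step
instance (grid : List (List String)) (col_start : Int) (col_end : Int) (col_step : Int) (out : List (Int × List (Int × Int))) : Decidable (Spec_hash_rows grid col_start col_end col_step out) := by unfold Spec_hash_rows; infer_instance

-- ===== CLAIM (what is proved, stated in full; the proofs are below) =====
def Claim_equal_hash_rows : Prop := ∀ (grid : List (List String)) (col_start : Int) (col_end : Int) (col_step : Int), Dom_hash_rows grid col_start col_end col_step → Pre_hash_rows grid col_start col_end col_step → Spec_hash_rows grid col_start col_end col_step (hash_rows grid col_start col_end col_step)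
-- ===== LEMMAS AND PROOFS =====

-- Common specification of one row's segment list, pending 'O' count o.
def specRow : List (Int × String) → Int → List (Int × Int)
  | [], o => if o > 0 then [(o, -1)] else []
  | (c, ch) :: rest, o =>
    if ch == "#" then (o, c) :: specRow rest 0
    else specRow rest (if ch == "O" then o + 1 else o)

-- A's inner loop step and finish.
def stepA (st : Int × List (Int × Int)) (q : Int × String) : Int × List (Int × Int) :=
  let o := if q.2 == "O" then st.1 + 1 else st.1
  if q.2 == "#" then (0, st.2 ++ [(o, q.1)]) else (o, st.2)

theorem lemA (cells : List (Int × String)) (o : Int) (acc : List (Int × Int)) :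
    (let st := cells.foldl stepA (o, acc);
     if st.1 > 0 then st.2 ++ [(st.1, -1)] else st.2) = acc ++ specRow cells o := by
  induction cells generalizing o acc with
  | nil =>
    simp only [List.foldl, specRow]
    split <;> simp
  | cons q rest ih =>
    obtain ⟨c, ch⟩ := q
    simp only [List.foldl_cons]
    by_cases h : ch = "#"
    · subst h
      have e : stepA (o, acc) (c, "#") = (0, acc ++ [(o, c)]) := by simp [stepA]
      rw [e, ih 0 (acc ++ [(o, c)])]
      simp [specRow]
    · have e : stepA (o, acc) (c, ch) = (if ch == "O" then o + 1 else o, acc) := by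
        simp [stepA, h]
      rw [e, ih]
      simp [specRow, h]

-- B's inner loop step.
def stepB (cells : List (Int × String)) (st : Int × List (Int × Int)) (i : Int) : Int × List (Int × Int) :=
  (i + 1, st.2 ++ [(((PySem.List.slice cells (some st.1) (some i)).countP (fun q => q.2 == "O") : Int),
    (PySem.List.pyGetD cells i (0, "")).1)])

def finishB (cells : List (Int × String)) (st : Int × List (Int × Int)) : List (Int × Int) :=
  let tail : Int := ((PySem.List.slice cells (some st.1) none).countP (fun q => q.2 == "O") : Int)
  if tail > 0 then st.2 ++ [(tail, -1)] else st.2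

theorem lemB (cells : List (Int × String)) :
    ∀ (done seg : List (Int × String)) (acc : List (Int × Int)),
    (∀ q ∈ seg, (q.2 == "#") = false) →
    finishB (done ++ seg ++ cells)
      ((((PySem.List.enumerate cells ((done.length + seg.length : Nat) : Int)).filter
          (fun q => q.2.2 == "#")).map (fun q => q.1)).foldl
        (stepB (done ++ seg ++ cells)) (((done.length : Nat) : Int), acc))
    = acc ++ specRow cells ((seg.countP (fun q => q.2 == "O") : Int)) := by
  induction cells with
  | nil =>
    intro done seg acc hseg
    simp only [PySem.List.enumerate_nil, List.filter_nil, List.map_nil, List.foldl_nil,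
      finishB, specRow, List.append_nil]
    rw [PySem.List.slice_from_natCast]
    simp only [List.drop_append_of_le_length (le_refl _), List.drop_length, List.nil_append]
    rw [List.countP_eq_length_filter]
    split <;> simp
  | cons q rest ih =>
    intro done seg acc hseg
    obtain ⟨c, ch⟩ := q
    rw [PySem.List.enumerate_cons]
    by_cases h : ch = "#"
    · subst h
      simp only [List.filter_cons, beq_self_eq_true, if_true, List.map_cons, List.foldl_cons]
      have hcnt : PySem.List.slice (done ++ seg ++ (c, "#") :: rest)
          (some ((done.length : Nat) : Int)) (some ((done.length + seg.length : Nat) : Int))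
          = seg := by
        rw [PySem.List.slice_natCast]
        have h1 : (done ++ seg ++ (c, "#") :: rest).drop done.length
            = seg ++ (c, "#") :: rest := by
          rw [List.append_assoc, List.drop_append_of_le_length (le_refl _),
            List.drop_length, List.nil_append]
        rw [h1, show done.length + seg.length - done.length = seg.length from by omega,
          List.take_append_of_le_length (le_refl _), List.take_length]
      have hget : PySem.List.pyGetD (done ++ seg ++ (c, "#") :: rest)
          ((done.length + seg.length : Nat) : Int) (0, "") = (c, "#") := by
        rw [PySem.List.pyGetD_natCast,
          show done ++ seg ++ (c, "#") :: rest = (done ++ seg) ++ (c, "#") :: rest from by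
            simp [List.append_assoc],
          show done.length + seg.length = (done ++ seg).length from by simp,
          List.getD_eq_getElem?_getD, List.getElem?_append_right (le_refl _)]
        simp
      have hstep : stepB (done ++ seg ++ (c, "#") :: rest)
          (((done.length : Nat) : Int), acc) ((done.length + seg.length : Nat) : Int)
          = (((done.length + seg.length : Nat) : Int) + 1,
             acc ++ [((seg.countP (fun q => q.2 == "O") : Int), c)]) := by
        unfold stepB
        rw [hcnt, hget]
      have hlen2 : ((done.length + seg.length : Nat) : Int) + 1
          = (((done ++ seg ++ [(c, "#")]).length : Nat) : Int) := by
        simp only [List.length_append, List.length_cons, List.length_nil]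
        push_cast; ring
      rw [hstep, hlen2]
      have IH := ih (done ++ seg ++ [(c, "#")]) []
        (acc ++ [((seg.countP (fun q => q.2 == "O") : Int), c)]) (by simp)
      simp only [List.append_nil, List.append_assoc, List.cons_append, List.nil_append,
        List.length_nil, Nat.add_zero, List.countP_nil, Nat.cast_zero] at IH
      simp only [List.append_assoc]
      rw [IH]
      simp [specRow]
    · have hb : (ch == "#") = false := by simp [h]
      simp only [List.filter_cons, hb, Bool.false_eq_true, reduceIte]
      have hfull : done ++ seg ++ (c, ch) :: rest
          = done ++ (seg ++ [(c, ch)]) ++ rest := by simp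
      have hlen : ((done.length + seg.length : Nat) : Int) + 1
          = ((done.length + (seg ++ [(c, ch)]).length : Nat) : Int) := by
        simp only [List.length_append, List.length_cons, List.length_nil]
        push_cast; ring
      rw [hfull, hlen,
        ih done (seg ++ [(c, ch)]) acc
          (by intro q hq; rcases List.mem_append.mp hq with h1 | h1
              · exact hseg q h1
              · simp at h1; subst h1; exact hb)]
      simp only [specRow, hb, if_false]
      congr 2
      rw [List.countP_append]
      by_cases ho : ch = "O" <;> simp [ho]

theorem row_eq (cells : List (Int × String)) :
    (let st := cells.foldl stepA (0, []);
     if st.1 > 0 then st.2 ++ [(st.1, -1)] else st.2)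
    = finishB cells
        ((((PySem.List.enumerate cells 0).filter (fun q => q.2.2 == "#")).map
          (fun q => q.1)).foldl (stepB cells) (0, [])) := by
  rw [lemA cells 0 []]
  have := lemB cells [] [] [] (by simp)
  simp only [List.length_nil, List.nil_append, List.countP_nil, Nat.cast_zero,
    Nat.zero_add, Nat.cast_ofNat] at this
  rw [this]
  simp

-- ===== VERDICT (by name: the statement is the Claim_ definition above) =====
theorem hash_rows_spec : Claim_equal_hash_rows := by
  intro grid col_start col_end col_step _hdom _hpre
  unfold Spec_hash_rows hash_rows hash_rows_alt
  rw [PySem.List.foldl_append_singleton_eq_map, PySem.List.foldl_append_singleton_eq_map]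
  rw [PySem.List.enumerate_eq_map_pyRange (d := ([] : List String)), List.map_map]
  apply List.map_congr_left
  intro r _
  simp only [Function.comp]
  congr 1
  have := row_eq ((PySem.List.pyRange col_start col_end col_step).map
      (fun c => (c, PySem.List.pyGetD (PySem.List.pyGetD grid r []) c "")))
  rw [List.foldl_map] at this
  simpa [stepA, stepB, finishB] using this
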